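-- pv_equiv track=rewrite | github.com/Fabianstw/Puzzles | AOC/Y24/25/py1.py | get_key_heights
-- ===== SOURCE A (Python) =====
-- def get_key_heights(keys):
-- 	heights = []
-- 	for key in keys:
-- 		key_heights = []
-- 		for i in range(len(key[0])):
-- 			h = -1
-- 			for j in range(len(key) - 1, -1, -1):
-- 				if key[j][i] == "#":
-- 					h += 1
-- 				else:
-- 					break
-- 			key_heights.append(h)
-- 		heights.append(key_heights)
-- 	return heights
-- ===== SOURCE B (Python) =====
-- def get_key_heights(keys):
--     heights = []
--     for key in keys:
--         counts = [0] * len(key[0])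
--         for row in key:
--             counts = [c + 1 if ch == "#" else 0 for ch, c in zip(row, counts)]
--         heights.append([c - 1 for c in counts])
--     return heights
-- ===== Notes on version B (the rewrite author's own statement) =====
-- stated objective: alternative
-- what changed: B replaces A's per-column bottom-up scan with break by one forward streaming pass over the rows, maintaining a vector of reset counters (counts[i] becomes c+1 on '#' and 0 otherwise), so the trailing run per column falls out of a single top-to-bottom sweep with no reversal or break.
-- outside the precondition, e.g. on get_key_heights([['x.', '.', '..']]): A returns [[-1, -1]], B returns [[-1]]
import Mathlib
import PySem

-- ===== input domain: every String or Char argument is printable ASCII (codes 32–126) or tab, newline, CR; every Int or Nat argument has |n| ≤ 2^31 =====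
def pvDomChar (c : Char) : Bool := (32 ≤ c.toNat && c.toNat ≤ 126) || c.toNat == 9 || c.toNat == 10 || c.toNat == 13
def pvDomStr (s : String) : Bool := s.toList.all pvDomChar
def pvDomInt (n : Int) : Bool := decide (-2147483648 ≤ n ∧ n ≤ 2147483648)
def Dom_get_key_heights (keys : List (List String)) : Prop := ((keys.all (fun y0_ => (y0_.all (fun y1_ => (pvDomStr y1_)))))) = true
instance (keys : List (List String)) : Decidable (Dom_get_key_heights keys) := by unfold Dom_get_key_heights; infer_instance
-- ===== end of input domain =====

-- B replaces A's per-column bottom-up scan with break by one forward streaming pass over the rows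
-- with a vector of reset counters; same asymptotic cost (objective: alternative).


-- ===== PORT A =====
-- inner 'for j in range(len(key)-1, -1, -1)' with its break: structural recursion over the j-list.
-- key[j][i] is read with pyGet?/getD; under Pre_ both indices are always in range, so the defaults never fire.
def jLoop (key : List String) (i : Int) : List Int → Int → Int
  | [], h => h
  | j :: js, h =>
      if (PySem.Str.pyGet? ((PySem.List.pyGet? key j).getD "") i).getD ' ' == '#' then
        jLoop key i js (h + 1)
      else h

def get_key_heights (keys : List (List String)) : List (List Int) :=
  keys.foldl (fun heights key =>
    heights ++ [(PySem.List.pyRange 0 (PySem.Str.len ((PySem.List.pyGet? key 0).getD "")) 1).foldl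
      (fun kh i => kh ++ [jLoop key i (PySem.List.pyRange (PySem.List.len key - 1) (-1) (-1)) (-1)]) []]) []

-- ===== PORT B =====
-- 'counts = [c + 1 if ch == "#" else 0 for ch, c in zip(row, counts)]'
def stepRow (row : String) (counts : List Int) : List Int :=
  List.zipWith (fun ch c => if ch == '#' then c + 1 else 0) row.toList counts

def get_key_heights_alt (keys : List (List String)) : List (List Int) :=
  keys.foldl (fun heights key =>
    heights ++ [((key.foldl (fun counts row => stepRow row counts)
        (List.replicate ((PySem.List.pyGet? key 0).getD "").toList.length 0)).map (fun c => c - 1))]) []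

-- ===== PRECONDITION & SPEC =====
-- Pre_ excludes grids with an empty key (A raises IndexError on key[0]) and grids in which some row is
-- shorter than the first row, on which A either raises IndexError or reads len(key[0]) columns where
-- B's zip truncates to the shortest: A's value there is an accident of its row-major indexing.
def Pre_get_key_heights (keys : List (List String)) : Prop :=
  ∀ key ∈ keys, key ≠ [] ∧ ∀ row ∈ key, (key.headD "").toList.length ≤ row.toList.length
instance (keys : List (List String)) : Decidable (Pre_get_key_heights keys) := by
  unfold Pre_get_key_heights; infer_instance

def pvWitness_get_key_heights : List (List String) :=
  [["#####", ".####", "..#.#"], ["..", ".#"]]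

def Spec_get_key_heights (keys : List (List String)) (out : List (List Int)) : Prop := out = get_key_heights_alt keys
instance (keys : List (List String)) (out : List (List Int)) : Decidable (Spec_get_key_heights keys out) := by unfold Spec_get_key_heights; infer_instance

-- ===== CLAIM (what is proved, stated in full; the proofs are below) =====
def Claim_equal_get_key_heights : Prop := ∀ (keys : List (List String)), Dom_get_key_heights keys → Pre_get_key_heights keys → Spec_get_key_heights keys (get_key_heights keys)

-- ===== LEMMAS AND PROOFS =====

-- the loop of A's innermost scan, as a recursion over the bottom-to-top column
def bottomRun : List Char → Int → Int
  | [], n => n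
  | c :: cs, n => if c ≠ '#' then n else bottomRun cs (n + 1)

theorem bottomRun_shift (cs : List Char) : ∀ n : Int, bottomRun cs (n + 1) = bottomRun cs n + 1 := by
  induction cs with
  | nil => intro n; simp [bottomRun]
  | cons c cs ih => intro n; by_cases h : c = '#' <;> simp [bottomRun, h, ih]

-- jLoop over a list of in-range indices is bottomRun over the corresponding characters.
theorem jLoop_eq_bottomRun (key : List String) (iN : Nat) :
    ∀ (js : List Nat) (h : Int), (∀ j ∈ js, j < key.length) →
    jLoop key iN (js.map (fun j : Nat => (j : Int))) h
      = bottomRun (js.map (fun j => ((key.map String.toList).getD j []).getD iN ' ')) (h + 1) - 1 := by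
  intro js
  induction js with
  | nil => intro h _; simp [jLoop, bottomRun]
  | cons j js ih =>
    intro h hb
    have hj : j < key.length := hb j (by simp)
    have hread : (PySem.Str.pyGet? ((PySem.List.pyGet? key ((j : Nat) : Int)).getD "") ((iN : Nat) : Int)).getD ' '
        = ((key.map String.toList).getD j []).getD iN ' ' := by
      simp [PySem.List.pyGet?_natCast, List.getElem?_eq_getElem hj, List.getD,
        List.getElem?_map]
    simp only [List.map_cons, jLoop, bottomRun, hread]
    by_cases hc : ((key.map String.toList).getD j []).getD iN ' ' = '#'
    · simp only [hc]
      rw [if_pos (by simp), if_neg (by simp)]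
      rw [ih (h + 1) (fun x hx => hb x (by simp [hx]))]
    · rw [if_neg (by simpa using hc), if_pos (by simpa using hc)]
      omega

-- B's reset-counter fold over a column, read top to bottom, computes the trailing '#'-run.
theorem foldl_reset_eq_bottomRun (col : List Char) :
    col.foldl (fun c ch => if ch == '#' then c + 1 else 0) 0 = bottomRun col.reverse 0 := by
  induction col using List.reverseRecOn with
  | nil => simp [bottomRun]
  | append_singleton l x ih =>
    rw [List.foldl_append, List.foldl_cons, List.foldl_nil]
    simp only [List.reverse_append, List.reverse_singleton, List.singleton_append]
    by_cases h : x = '#'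
    · rw [if_pos (by simp [h])]
      simp only [bottomRun]
      rw [if_neg (by simp [h]), bottomRun_shift, ih]
    · rw [if_neg (by simp [h])]
      simp only [bottomRun]
      rw [if_pos (by simp [h])]

theorem zipWith_map_range {w : Nat} (f : Char → Int → Int) (r : List Char) (g : Nat → Int)
    (hr : w ≤ r.length) :
    List.zipWith f r ((List.range w).map g) = (List.range w).map (fun i => f (r.getD i ' ') (g i)) := by
  apply List.ext_getElem
  · simp; omega
  · intro k h1 h2
    simp only [List.length_zipWith, List.length_map, List.length_range] at h1
    have hk : k < w := by omega
    have hkr : k < r.length := by omega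
    simp [List.getElem_zipWith, List.getD_eq_getElem?_getD, List.getElem?_eq_getElem hkr]

-- the state invariant of B's row fold: each counter evolves independently per column.
theorem foldl_rows {w : Nat} :
    ∀ (rows : List String) (g : Nat → Int), (∀ r ∈ rows, w ≤ r.toList.length) →
    rows.foldl (fun counts row => stepRow row counts) ((List.range w).map g)
      = (List.range w).map (fun i =>
          rows.foldl (fun c r => if r.toList.getD i ' ' == '#' then c + 1 else 0) (g i)) := by
  intro rows
  induction rows with
  | nil => intro g _; simp
  | cons r rs ih =>
    intro g hb
    rw [List.foldl_cons]
    have hstep : stepRow r ((List.range w).map g)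
        = (List.range w).map (fun i => if r.toList.getD i ' ' == '#' then g i + 1 else 0) := by
      unfold stepRow
      rw [zipWith_map_range _ _ _ (hb r (by simp))]
    rw [hstep, ih _ (fun x hx => hb x (by simp [hx]))]
    simp only [List.foldl_cons]

-- ===== VERDICT (by name: the statement is the Claim_ definition above) =====
theorem get_key_heights_spec : Claim_equal_get_key_heights := by
  intro keys _ hpre
  unfold Spec_get_key_heights get_key_heights get_key_heights_alt
  rw [PySem.List.foldl_append_singleton_eq_map]
  rw [PySem.List.foldl_append_singleton_eq_map]
  rw [List.nil_append, List.nil_append]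
  apply List.map_congr_left
  intro key hk
  obtain ⟨hne, hlen⟩ := hpre key hk
  obtain ⟨k0, krest, rfl⟩ := List.exists_cons_of_ne_nil hne
  rw [PySem.List.foldl_append_singleton_eq_map, List.nil_append]
  have hget0 : (PySem.List.pyGet? (k0 :: krest) 0).getD "" = k0 := by simp
  rw [hget0]
  have hlenStr : PySem.Str.len k0 = (k0.toList.length : Int) := by simp [PySem.Str.len_eq]
  rw [hlenStr]
  set w := k0.toList.length with hw
  have hrep : (List.replicate w (0 : Int)) = (List.range w).map (fun _ => (0 : Int)) := by
    simp [List.map_const']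
  rw [hrep, foldl_rows (k0 :: krest) (fun _ => 0)
      (by intro r hr
          rcases List.mem_cons.mp hr with h | h
          · subst h; omega
          · exact hlen r (by simp [h]))]
  rw [List.map_map, PySem.List.pyRange_zero_nat, List.map_map]
  apply List.map_congr_left
  intro iN hiN
  simp only [Function.comp_apply]
  have hn : PySem.List.len (k0 :: krest) = ((k0 :: krest).length : Int) := PySem.List.len_eq _
  rw [hn]
  have hrange : PySem.List.pyRange (((k0 :: krest).length : Int) - 1) (-1) (-1)
      = ((List.range (k0 :: krest).length).map (fun k => (k0 :: krest).length - 1 - k)).map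
          (fun j : Nat => (j : Int)) := by
    rw [PySem.List.pyRange_neg_one, List.map_map]
    have ht : (((k0 :: krest).length : Int) - 1 - (-1)).toNat = (k0 :: krest).length := by omega
    rw [ht]
    apply List.map_congr_left
    intro k hk
    have hk' : k < (k0 :: krest).length := List.mem_range.mp hk
    simp only [Function.comp_apply]
    omega
  rw [hrange]
  rw [jLoop_eq_bottomRun (k0 :: krest) iN _ (-1)
      (by intro j hj
          obtain ⟨k, hk, rfl⟩ := List.mem_map.mp hj
          have := List.mem_range.mp hk
          omega)]
  have hcols : List.map (fun j => (((k0 :: krest).map String.toList).getD j []).getD iN ' ')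
      ((List.range (k0 :: krest).length).map (fun k => (k0 :: krest).length - 1 - k))
      = (((k0 :: krest).map (fun r => r.toList.getD iN ' '))).reverse := by
    apply List.ext_getElem
    · simp
    · intro k h1 h2
      simp only [List.getElem_map, List.getElem_range, List.getElem_reverse, List.length_map,
        List.length_range] at h1 h2 ⊢
      have hlt : (k0 :: krest).length - 1 - k < ((k0 :: krest).map String.toList).length := by
        simp only [List.length_map]; omega
      have hrow : (List.map String.toList (k0 :: krest)).getD ((k0 :: krest).length - 1 - k) []
          = (k0 :: krest)[(k0 :: krest).length - 1 - k].toList := by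
        rw [List.getD_eq_getElem?_getD, List.getElem?_eq_getElem hlt, Option.getD_some,
          List.getElem_map]
      rw [hrow]
  rw [hcols]
  -- B side: fold over rows, counts[i] fold, equals bottomRun of the reversed column, via
  -- rewriting the per-row fold as a fold over the column characters.
  have hfold : (k0 :: krest).foldl
      (fun c r => if r.toList.getD iN ' ' == '#' then c + 1 else 0) (0 : Int)
      = ((k0 :: krest).map (fun r => r.toList.getD iN ' ')).foldl
          (fun c ch => if ch == '#' then c + 1 else 0) 0 := by
    rw [List.foldl_map]
  have h01 : (-1 : Int) + 1 = 0 := by norm_num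
  rw [h01]
  show bottomRun ((k0 :: krest).map (fun r => r.toList.getD iN ' ')).reverse 0 - 1
      = List.foldl (fun c r => if r.toList.getD iN ' ' == '#' then c + 1 else 0) 0 (k0 :: krest) - 1
  exact congrArg (fun t => t - 1)
    (((foldl_reset_eq_bottomRun ((k0 :: krest).map (fun r => r.toList.getD iN ' '))).symm).trans hfold.symm)
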